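-- pv_equiv track=rewrite | github.com/Utsukara/CodingTemplePythonFunctions | PythonFunctions.py | letterGradeCat
-- ===== SOURCE A (Python) =====
-- def letterGradeCat(gradeList):
--     gradeCategories = {'A': [], 'B': [], 'C': [], 'D': [], 'F': []}
--
--     for grade in gradeList:
--         if grade >= 90:
--             gradeCategories['A'].append(grade)
--         elif grade >= 80:
--             gradeCategories['B'].append(grade)
--         elif grade >= 70:
--             gradeCategories['C'].append(grade)
--         elif grade >= 60:
--             gradeCategories['D'].append(grade)
--         else:
--             gradeCategories['F'].append(grade)
--
--     categorizedGradesList = [(category, grades) for category, grades in gradeCategories.items()]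
--
--     return categorizedGradesList
-- ===== SOURCE B (Python) =====
-- def letterGradeCat(gradeList):
--     # Five independent filter passes (one per letter), no mutable buckets or
--     # per-grade dispatch: each category's list is a filter over the whole input.
--     ranges = [('A', 90, None), ('B', 80, 90), ('C', 70, 80), ('D', 60, 70), ('F', None, 60)]
--     return [(letter,
--              [g for g in gradeList
--               if (lo is None or g >= lo) and (hi is None or g < hi)])
--             for letter, lo, hi in ranges]
-- ===== Notes on version B (the rewrite author's own statement) =====
-- stated objective: simpler
-- what changed: Replaces the single-pass if/elif dispatch into a mutable dict by five independent filter passes: each letter's list is a comprehension selecting grades in that letter's half-open range, with no mutable state.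
import Mathlib
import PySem

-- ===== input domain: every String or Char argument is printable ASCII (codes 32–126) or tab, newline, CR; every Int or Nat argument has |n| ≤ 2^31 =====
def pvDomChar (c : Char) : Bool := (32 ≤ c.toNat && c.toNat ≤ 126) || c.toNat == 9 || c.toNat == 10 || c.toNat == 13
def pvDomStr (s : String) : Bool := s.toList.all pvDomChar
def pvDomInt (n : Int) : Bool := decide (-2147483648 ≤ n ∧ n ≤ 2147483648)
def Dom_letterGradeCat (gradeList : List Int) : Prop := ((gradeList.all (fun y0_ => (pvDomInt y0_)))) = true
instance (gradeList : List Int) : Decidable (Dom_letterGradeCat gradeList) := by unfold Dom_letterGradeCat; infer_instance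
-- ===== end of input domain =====

-- B replaces A's single-pass if/elif dispatch into a mutable dict by five independent
-- filter passes, one per letter's half-open range; simpler, no mutable state, same cost.

-- ===== PORT A =====
-- one step of A's for-loop: the if/elif cascade appending into the dict
def pvStepA (d : PySem.Dict String (List Int)) (grade : Int) : PySem.Dict String (List Int) :=
  if grade ≥ 90 then d.modify "A" [] (· ++ [grade])
  else if grade ≥ 80 then d.modify "B" [] (· ++ [grade])
  else if grade ≥ 70 then d.modify "C" [] (· ++ [grade])
  else if grade ≥ 60 then d.modify "D" [] (· ++ [grade])
  else d.modify "F" [] (· ++ [grade])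

def letterGradeCat (gradeList : List Int) : List (String × List Int) :=
  let gradeCategories : PySem.Dict String (List Int) :=
    ((((PySem.Dict.empty.insert "A" []).insert "B" []).insert "C" []).insert "D" []).insert "F" []
  let gradeCategories := gradeList.foldl pvStepA gradeCategories
  gradeCategories.items.map (fun p => (p.1, p.2))

-- ===== PORT B =====
-- the comprehension's per-grade test for one (lo, hi) range
def pvInRange (lo hi : Option Int) (g : Int) : Bool :=
  (lo.isNone || decide ((lo.getD 0) ≤ g)) && (hi.isNone || decide (g < hi.getD 0))

def letterGradeCat_alt (gradeList : List Int) : List (String × List Int) :=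
  let ranges : List (String × Option Int × Option Int) :=
    [("A", some 90, none), ("B", some 80, some 90), ("C", some 70, some 80),
     ("D", some 60, some 70), ("F", none, some 60)]
  ranges.map (fun r => (r.1, gradeList.filter (pvInRange r.2.1 r.2.2)))

-- ===== PRECONDITION & SPEC =====
def Spec_letterGradeCat (gradeList : List Int) (out : List (String × List Int)) : Prop := out = letterGradeCat_alt gradeList
instance (gradeList : List Int) (out : List (String × List Int)) : Decidable (Spec_letterGradeCat gradeList out) := by unfold Spec_letterGradeCat; infer_instance

-- ===== CLAIM =====
def Claim_equal_letterGradeCat : Prop := ∀ (gradeList : List Int), Dom_letterGradeCat gradeList → Spec_letterGradeCat gradeList (letterGradeCat gradeList)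

-- ===== LEMMAS AND PROOFS =====

-- invariant for A's loop over an explicit 5-entry dict
lemma loopA_inv (gs : List Int) (a b c d f : List Int) :
    gs.foldl pvStepA (PySem.Dict.mk [("A", a), ("B", b), ("C", c), ("D", d), ("F", f)]) =
      PySem.Dict.mk [("A", a ++ gs.filter (fun g => 90 ≤ g)),
                     ("B", b ++ gs.filter (fun g => 80 ≤ g ∧ ¬ 90 ≤ g)),
                     ("C", c ++ gs.filter (fun g => 70 ≤ g ∧ ¬ 80 ≤ g)),
                     ("D", d ++ gs.filter (fun g => 60 ≤ g ∧ ¬ 70 ≤ g)),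
                     ("F", f ++ gs.filter (fun g => ¬ 60 ≤ g))] := by
  induction gs generalizing a b c d f with
  | nil => simp
  | cons g gs ih =>
    simp only [List.foldl_cons, pvStepA]
    split_ifs with h1 h2 h3 h4 <;>
      simp [PySem.Dict.modify, PySem.Dict.insert, PySem.Dict.getD, PySem.Dict.get?, ih,
            List.filter_cons] <;> omega

-- each of B's range tests coincides with the corresponding cascade condition
lemma filter_congr_of_eq {p q : Int → Bool} (gs : List Int) (h : ∀ g, p g = q g) :
    gs.filter p = gs.filter q := by
  simp [show p = q from funext h]

-- ===== VERDICT =====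
theorem letterGradeCat_spec : Claim_equal_letterGradeCat := by
  intro gs _
  unfold Spec_letterGradeCat letterGradeCat letterGradeCat_alt
  have hA := loopA_inv gs [] [] [] [] []
  simp only []
  rw [show ((((PySem.Dict.empty.insert "A" ([]:List Int)).insert "B" []).insert "C" []).insert "D" []).insert "F" [] =
        PySem.Dict.mk [("A", []), ("B", []), ("C", []), ("D", []), ("F", [])] from by decide]
  rw [hA]
  simp only [List.map_cons, List.map_nil, List.nil_append]
  simp only [Prod.mk.injEq, List.cons.injEq, and_true, true_and]
  refine ⟨?_, ?_, ?_, ?_, ?_⟩ <;>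
    · apply filter_congr_of_eq
      intro g
      by_cases h1 : (60:Int) ≤ g <;> by_cases h2 : (70:Int) ≤ g <;>
        by_cases h3 : (80:Int) ≤ g <;> by_cases h4 : (90:Int) ≤ g <;>
        first
          | omega
          | (simp [pvInRange, h1, h2, h3, h4]; try omega)
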